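-- pv_equiv track=rewrite | github.com/gilll99/first_python__project | tests/test_calculator_addition.py | last_output_value
-- ===== SOURCE A (Python) =====
-- def last_output_value(stdout: str) -> str:
--     # extract last token that can be parsed as int from the stdout
--     tokens = []
--     for line in stdout.splitlines():
--         for part in line.strip().split():
--             tokens.append(part)
--     # find last token that is an integer
--     for t in reversed(tokens):
--         try:
--             int(t)
--             return t
--         except Exception:
--             continue
--     return ""
-- ===== SOURCE B (Python) =====
-- def last_output_value(stdout: str) -> str:
--     # single forward pass: remember the most recent int-parseable token; no token list, no reversal
--     result = ""
--     for line in stdout.splitlines():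
--         for part in line.strip().split():
--             try:
--                 int(part)
--                 result = part
--             except Exception:
--                 pass
--     return result
-- ===== Notes on version B (the rewrite author's own statement) =====
-- stated objective: simpler
-- what changed: Replaced build-token-list-then-reverse-scan-with-early-return by a single forward pass that keeps the latest int-parseable token in an accumulator, never materialising the token list.
import Mathlib
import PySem

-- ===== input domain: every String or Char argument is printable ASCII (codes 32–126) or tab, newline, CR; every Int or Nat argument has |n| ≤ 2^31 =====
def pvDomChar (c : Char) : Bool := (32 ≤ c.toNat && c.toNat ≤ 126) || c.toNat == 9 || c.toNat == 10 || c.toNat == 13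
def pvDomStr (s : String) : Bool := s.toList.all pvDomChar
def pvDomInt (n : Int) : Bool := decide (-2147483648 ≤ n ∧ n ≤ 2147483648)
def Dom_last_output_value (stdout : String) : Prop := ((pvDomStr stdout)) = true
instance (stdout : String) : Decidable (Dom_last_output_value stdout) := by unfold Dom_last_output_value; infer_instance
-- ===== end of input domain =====

-- B replaces A's build-list-then-reverse-scan-with-early-return by one forward pass keeping the
-- latest int-parseable token in an accumulator (objective: simpler; return value only).

-- ===== PORT A =====
-- A's final loop: 'for t in reversed(tokens): try int(t); return t; except: continue', then return ""
def lastA_scan : List String → String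
  | [] => ""
  | t :: ts => if (PySem.Int.ofStr? t).isSome then t else lastA_scan ts

def last_output_value (stdout : String) : String :=
  let tokens := (PySem.Str.splitlines stdout).foldl
    (fun acc line => acc ++ PySem.Str.split₀ (PySem.Str.strip line)) []
  lastA_scan tokens.reverse

-- ===== PORT B =====
def last_output_value_alt (stdout : String) : String :=
  (PySem.Str.splitlines stdout).foldl
    (fun res line =>
      (PySem.Str.split₀ (PySem.Str.strip line)).foldl
        (fun r part => if (PySem.Int.ofStr? part).isSome then part else r) res)
    ""

-- ===== PRECONDITION & SPEC =====
def Spec_last_output_value (stdout : String) (out : String) : Prop := out = last_output_value_alt stdout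
instance (stdout : String) (out : String) : Decidable (Spec_last_output_value stdout out) := by unfold Spec_last_output_value; infer_instance

-- ===== CLAIM (what is proved, stated in full; the proofs are below) =====
def Claim_equal_last_output_value : Prop := ∀ (stdout : String), Dom_last_output_value stdout → Spec_last_output_value stdout (last_output_value stdout)

-- ===== LEMMAS AND PROOFS =====

-- first match in the list, as an Option (proof-side characterisation of A's reverse scan)
def firstHit? : List String → Option String
  | [] => none
  | t :: ts => if (PySem.Int.ofStr? t).isSome then some t else firstHit? ts

theorem lastA_scan_eq_firstHit (ts : List String) :
    lastA_scan ts = (firstHit? ts).getD "" := by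
  induction ts with
  | nil => rfl
  | cons t ts ih =>
    simp only [lastA_scan, firstHit?]
    split_ifs with h <;> simp [ih]

theorem firstHit?_append (xs ys : List String) :
    firstHit? (xs ++ ys) = (firstHit? xs).or (firstHit? ys) := by
  induction xs with
  | nil => rfl
  | cons x xs ih =>
    simp only [List.cons_append, firstHit?]
    split_ifs with h <;> simp [ih]

-- B's inner fold over a token list equals "first hit of the reversed list, default the accumulator"
theorem foldl_latest_eq (ts : List String) (r : String) :
    ts.foldl (fun r part => if (PySem.Int.ofStr? part).isSome then part else r) r
      = (firstHit? ts.reverse).getD r := by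
  induction ts generalizing r with
  | nil => rfl
  | cons t ts ih =>
    simp only [List.foldl_cons, List.reverse_cons, ih, firstHit?_append]
    cases h : firstHit? ts.reverse with
    | some v => simp
    | none => simp [firstHit?]; split_ifs with hp <;> simp

-- A's token list (accumulated with ++) is acc ++ flatMap of the per-line tokens
theorem tokens_foldl_eq (ls : List String) (acc : List String) :
    ls.foldl (fun acc line => acc ++ PySem.Str.split₀ (PySem.Str.strip line)) acc
      = acc ++ ls.flatMap (fun line => PySem.Str.split₀ (PySem.Str.strip line)) := by
  induction ls generalizing acc with
  | nil => simp
  | cons l ls ih => simp [ih]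

-- B's nested fold equals the single fold over the flattened token list
theorem alt_eq_flat (ls : List String) (r : String) :
    ls.foldl (fun res line =>
        (PySem.Str.split₀ (PySem.Str.strip line)).foldl
          (fun r part => if (PySem.Int.ofStr? part).isSome then part else r) res) r
      = (ls.flatMap (fun line => PySem.Str.split₀ (PySem.Str.strip line))).foldl
          (fun r part => if (PySem.Int.ofStr? part).isSome then part else r) r := by
  induction ls generalizing r with
  | nil => rfl
  | cons l ls ih => simp [ih, List.foldl_append]

-- ===== VERDICT (by name: the statement is the Claim_ definition above) =====
theorem last_output_value_spec : Claim_equal_last_output_value := by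
  intro stdout _
  unfold Spec_last_output_value last_output_value last_output_value_alt
  rw [alt_eq_flat, foldl_latest_eq, tokens_foldl_eq, List.nil_append, lastA_scan_eq_firstHit]
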